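-- pv_equiv track=rewrite | github.com/jailakwale/b_s_processor | lambda_functions/regex_classify_5_banks.py | clean_format
-- ===== SOURCE A (Python) =====
-- def clean_format(x):
--     x = x.upper()
--     mapping = {
--          "RE V":"REV",
--          "R EV":"REV",
--          "MO B":"MOB",
--          "M OB":"MOB",
--         "N IBSS":"NIBSS"
--         }
--
--     for k, v in mapping.items():
--         x = x.replace(k, v)
--     return x
-- ===== SOURCE B (Python) =====
-- def clean_format(x):
--     x = x.upper()
--     table = (("RE V", "REV"), ("R EV", "REV"), ("MO B", "MOB"),
--              ("M OB", "MOB"), ("N IBSS", "NIBSS"))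
--     out = []
--     i = 0
--     n = len(x)
--     while i < n:
--         for k, v in table:
--             if x.startswith(k, i):
--                 out.append(v)
--                 i += len(k)
--                 break
--         else:
--             out.append(x[i])
--             i += 1
--     return "".join(out)
-- ===== Notes on version B (the rewrite author's own statement) =====
-- stated objective: alternative
-- what changed: B makes a single left-to-right scan with a pattern table (first match at each position, emit replacement or the character) instead of A's five sequential full-string replace passes; the five patterns never overlap and no replacement creates a new match, so the results coincide.
import Mathlib
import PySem

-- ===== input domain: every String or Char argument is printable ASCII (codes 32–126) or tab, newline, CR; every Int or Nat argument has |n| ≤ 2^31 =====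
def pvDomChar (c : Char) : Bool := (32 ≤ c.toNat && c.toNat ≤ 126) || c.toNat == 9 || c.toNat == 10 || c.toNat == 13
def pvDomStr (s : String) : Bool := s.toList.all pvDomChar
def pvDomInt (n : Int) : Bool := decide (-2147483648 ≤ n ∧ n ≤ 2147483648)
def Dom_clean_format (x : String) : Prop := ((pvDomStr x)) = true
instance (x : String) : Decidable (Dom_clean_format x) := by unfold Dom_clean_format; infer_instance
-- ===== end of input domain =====

-- B replaces A's five sequential full-string replace passes by one left-to-right scan with a
-- pattern table (objective: alternative single-pass formulation; same return value).

-- ===== PORT A =====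
def clean_format (x : String) : String :=
  let x1 := PySem.Str.upper x
  let mapping : PySem.Dict String String :=
    PySem.Dict.ofList [("RE V", "REV"), ("R EV", "REV"), ("MO B", "MOB"),
                       ("M OB", "MOB"), ("N IBSS", "NIBSS")]
  mapping.items.foldl (fun s kv => PySem.Str.replace s kv.1 kv.2) x1

-- ===== PORT B =====
-- the single left-to-right scan of Source B: at each position try the five patterns in table order
def scanGo : List Char → List Char
  | [] => []
  | c :: t =>
    if ['R','E',' ','V'].isPrefixOf (c :: t) then
      'R' :: 'E' :: 'V' :: scanGo ((c :: t).drop 4)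
    else if ['R',' ','E','V'].isPrefixOf (c :: t) then
      'R' :: 'E' :: 'V' :: scanGo ((c :: t).drop 4)
    else if ['M','O',' ','B'].isPrefixOf (c :: t) then
      'M' :: 'O' :: 'B' :: scanGo ((c :: t).drop 4)
    else if ['M',' ','O','B'].isPrefixOf (c :: t) then
      'M' :: 'O' :: 'B' :: scanGo ((c :: t).drop 4)
    else if ['N',' ','I','B','S','S'].isPrefixOf (c :: t) then
      'N' :: 'I' :: 'B' :: 'S' :: 'S' :: scanGo ((c :: t).drop 6)
    else
      c :: scanGo t
termination_by l => l.length
decreasing_by all_goals simp [List.length_drop]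

def clean_format_alt (x : String) : String :=
  String.ofList (scanGo (PySem.Str.upper x).toList)

-- ===== PRECONDITION & SPEC =====
def Spec_clean_format (x : String) (out : String) : Prop := out = clean_format_alt x
instance (x : String) (out : String) : Decidable (Spec_clean_format x out) := by unfold Spec_clean_format; infer_instance

-- ===== CLAIM (what is proved, stated in full; the proofs are below) =====
def Claim_equal_clean_format : Prop := ∀ (x : String), Dom_clean_format x → Spec_clean_format x (clean_format x)

-- ===== LEMMAS AND PROOFS =====

-- one left-to-right replace pass with a nonempty pattern p0 :: pr (fuel-free form of Chars.replace.go)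
def rep1 (p0 : Char) (pr out : List Char) : List Char → List Char
  | [] => []
  | c :: t =>
    if (p0 :: pr).isPrefixOf (c :: t) then out ++ rep1 p0 pr out (t.drop pr.length)
    else c :: rep1 p0 pr out t
termination_by l => l.length
decreasing_by all_goals simp [List.length_drop]

theorem go_eq_rep1 (p0 : Char) (pr out : List Char) :
    ∀ (fuel : Nat) (l acc : List Char), l.length ≤ fuel →
      PySem.Chars.replace.go (p0 :: pr) out fuel l acc = acc.reverse ++ rep1 p0 pr out l := by
  intro fuel
  induction fuel with
  | zero =>
    intro l acc h
    have : l = [] := by cases l <;> simp_all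
    subst this
    simp [PySem.Chars.replace.go, rep1]
  | succ n ih =>
    intro l acc h
    cases l with
    | nil => simp [PySem.Chars.replace.go, rep1]
    | cons c t =>
      rw [PySem.Chars.replace.go]
      rw [rep1]
      by_cases hp : (p0 :: pr).isPrefixOf (c :: t) = true
      · simp only [hp, if_true]
        rw [ih _ _ (by simp at h ⊢; omega)]
        simp
      · simp only [hp, if_false, Bool.false_eq_true]
        rw [ih _ _ (by simp at h ⊢; omega)]
        simp

theorem replace_eq_rep1 (p0 : Char) (pr out l : List Char) :
    PySem.Chars.replace l (p0 :: pr) out = rep1 p0 pr out l := by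
  rw [PySem.Chars.replace]
  simp only [List.isEmpty_cons, Bool.false_eq_true, if_false]
  rw [go_eq_rep1 p0 pr out l.length l [] le_rfl]
  simp

theorem rep1_cons_neg (p0 : Char) (pr out : List Char) (c : Char) (t : List Char)
    (h : ¬ (p0 :: pr).isPrefixOf (c :: t) = true) :
    rep1 p0 pr out (c :: t) = c :: rep1 p0 pr out t := by
  rw [rep1]; simp [h]

theorem rep1_match (p0 : Char) (pr out u : List Char) :
    rep1 p0 pr out (p0 :: (pr ++ u)) = out ++ rep1 p0 pr out u := by
  rw [rep1]
  have hp : (p0 :: pr).isPrefixOf (p0 :: (pr ++ u)) = true := by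
    simp [List.isPrefixOf_iff_prefix]
  rw [hp]
  simp

theorem rep1_skip (p0 : Char) (pr out : List Char) :
    ∀ (w u : List Char), (∀ c ∈ w, c ≠ p0) →
    rep1 p0 pr out (w ++ u) = w ++ rep1 p0 pr out u := by
  intro w
  induction w with
  | nil => simp
  | cons d w' ih =>
    intro u hw
    have hd : d ≠ p0 := hw d (by simp)
    have : ¬ (p0 :: pr).isPrefixOf (d :: (w' ++ u)) = true := by
      simp [List.isPrefixOf_iff_prefix, List.cons_prefix_cons]
      intro h; exact absurd h.symm hd
    rw [List.cons_append, rep1_cons_neg _ _ _ _ _ this, ih u (fun c hc => hw c (by simp [hc]))]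
    simp

theorem rep1_prefix_iff (p0 : Char) (pr : List Char) (o0 : Char) (orest : List Char) :
    ∀ (w : List Char), (∀ c ∈ w, c ≠ p0 ∧ c ≠ o0) →
    ∀ u, (w <+: rep1 p0 pr (o0 :: orest) u ↔ w <+: u) := by
  intro w
  induction w with
  | nil => simp
  | cons d w' ih =>
    intro hw u
    have hd := hw d (by simp)
    have hw' : ∀ c ∈ w', c ≠ p0 ∧ c ≠ o0 := fun c hc => hw c (by simp [hc])
    cases u with
    | nil => simp [rep1]
    | cons c t =>
      rw [rep1]
      by_cases hp : (p0 :: pr).isPrefixOf (c :: t) = true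
      · have hc : c = p0 := by
          have := (List.isPrefixOf_iff_prefix.mp hp)
          exact (List.cons_prefix_cons.mp this).1.symm
        simp only [hp, if_true]
        constructor
        · intro h
          exact absurd (List.cons_prefix_cons.mp h).1 hd.2
        · intro h
          exact absurd ((List.cons_prefix_cons.mp h).1.trans hc) hd.1
      · simp only [hp, if_false, Bool.false_eq_true]
        rw [List.cons_prefix_cons, List.cons_prefix_cons, ih hw' t]


-- pattern fails at its second position inside the block c :: d :: w', then the rest skips
theorem rep1_skip2 (p0 q : Char) (pr' out : List Char) (c d : Char) (w' : List Char)
    (hqd : q ≠ d) (hw : ∀ e ∈ d :: w', e ≠ p0) (v : List Char) :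
    rep1 p0 (q :: pr') out ((c :: d :: w') ++ v) = (c :: d :: w') ++ rep1 p0 (q :: pr') out v := by
  have hb : (q == d) = false := by simp [hqd]
  have hneg : ¬ (p0 :: q :: pr').isPrefixOf (c :: (d :: (w' ++ v))) = true := by
    simp [List.isPrefixOf, hb]
  rw [List.cons_append, List.cons_append, rep1_cons_neg _ _ _ _ _ hneg]
  rw [show d :: (w' ++ v) = (d :: w') ++ v from rfl,
      rep1_skip p0 (q :: pr') out (d :: w') v hw]
  simp

-- the composition of A's five passes, on lists
def chainR (l : List Char) : List Char :=
  rep1 'N' [' ','I','B','S','S'] ['N','I','B','S','S']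
    (rep1 'M' [' ','O','B'] ['M','O','B']
      (rep1 'M' ['O',' ','B'] ['M','O','B']
        (rep1 'R' [' ','E','V'] ['R','E','V']
          (rep1 'R' ['E',' ','V'] ['R','E','V'] l))))

theorem A_toList (x : String) :
    (clean_format x).toList = chainR (PySem.Chars.upper x.toList) := by
  have hitems : (PySem.Dict.ofList ([("RE V", "REV"), ("R EV", "REV"), ("MO B", "MOB"),
                       ("M OB", "MOB"), ("N IBSS", "NIBSS")] : List (String × String))).items
      = [("RE V", "REV"), ("R EV", "REV"), ("MO B", "MOB"), ("M OB", "MOB"), ("N IBSS", "NIBSS")] := by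
    decide
  unfold clean_format
  simp only []
  rw [hitems]
  simp only [List.foldl]
  simp only [PySem.Str.toList_replace, chainR]
  have e1 : ("RE V" : String).toList = ['R','E',' ','V'] := rfl
  have e2 : ("R EV" : String).toList = ['R',' ','E','V'] := rfl
  have e3 : ("MO B" : String).toList = ['M','O',' ','B'] := rfl
  have e4 : ("M OB" : String).toList = ['M',' ','O','B'] := rfl
  have e5 : ("N IBSS" : String).toList = ['N',' ','I','B','S','S'] := rfl
  have f1 : ("REV" : String).toList = ['R','E','V'] := rfl
  have f2 : ("MOB" : String).toList = ['M','O','B'] := rfl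
  have f3 : ("NIBSS" : String).toList = ['N','I','B','S','S'] := rfl
  rw [e1, e2, e3, e4, e5, f1, f2, f3]
  rw [replace_eq_rep1, replace_eq_rep1, replace_eq_rep1, replace_eq_rep1, replace_eq_rep1]
  simp [PySem.Str.toList_upper]

set_option maxRecDepth 4000 in
theorem chain_match1 (u : List Char) :
    chainR (['R','E',' ','V'] ++ u) =
      ['R','E','V'] ++ chainR u := by
  unfold chainR
  rw [show ∀ v, rep1 'R' ['E',' ','V'] ['R','E','V'] (['R','E',' ','V'] ++ v) = ['R','E','V'] ++ rep1 'R' ['E',' ','V'] ['R','E','V'] v from fun v => by simpa using rep1_match 'R' ['E',' ','V'] ['R','E','V'] v]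
  rw [show ∀ v, rep1 'R' [' ','E','V'] ['R','E','V'] (['R','E','V'] ++ v) = ['R','E','V'] ++ rep1 'R' [' ','E','V'] ['R','E','V'] v from fun v => rep1_skip2 'R' ' ' ['E','V'] ['R','E','V'] 'R' 'E' ['V'] (by decide) (by simp) v]
  rw [rep1_skip 'M' ['O',' ','B'] ['M','O','B'] ['R','E','V'] _ (by simp)]
  rw [rep1_skip 'M' [' ','O','B'] ['M','O','B'] ['R','E','V'] _ (by simp)]
  rw [rep1_skip 'N' [' ','I','B','S','S'] ['N','I','B','S','S'] ['R','E','V'] _ (by simp)]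

set_option maxRecDepth 4000 in
theorem chain_match2 (u : List Char) :
    chainR (['R',' ','E','V'] ++ u) =
      ['R','E','V'] ++ chainR u := by
  unfold chainR
  rw [show ∀ v, rep1 'R' ['E',' ','V'] ['R','E','V'] (['R',' ','E','V'] ++ v) = ['R',' ','E','V'] ++ rep1 'R' ['E',' ','V'] ['R','E','V'] v from fun v => rep1_skip2 'R' 'E' [' ','V'] ['R','E','V'] 'R' ' ' ['E','V'] (by decide) (by simp) v]
  rw [show ∀ v, rep1 'R' [' ','E','V'] ['R','E','V'] (['R',' ','E','V'] ++ v) = ['R','E','V'] ++ rep1 'R' [' ','E','V'] ['R','E','V'] v from fun v => by simpa using rep1_match 'R' [' ','E','V'] ['R','E','V'] v]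
  rw [rep1_skip 'M' ['O',' ','B'] ['M','O','B'] ['R','E','V'] _ (by simp)]
  rw [rep1_skip 'M' [' ','O','B'] ['M','O','B'] ['R','E','V'] _ (by simp)]
  rw [rep1_skip 'N' [' ','I','B','S','S'] ['N','I','B','S','S'] ['R','E','V'] _ (by simp)]

set_option maxRecDepth 4000 in
theorem chain_match3 (u : List Char) :
    chainR (['M','O',' ','B'] ++ u) =
      ['M','O','B'] ++ chainR u := by
  unfold chainR
  rw [rep1_skip 'R' ['E',' ','V'] ['R','E','V'] ['M','O',' ','B'] u (by simp)]
  rw [rep1_skip 'R' [' ','E','V'] ['R','E','V'] ['M','O',' ','B'] _ (by simp)]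
  rw [show ∀ v, rep1 'M' ['O',' ','B'] ['M','O','B'] (['M','O',' ','B'] ++ v) = ['M','O','B'] ++ rep1 'M' ['O',' ','B'] ['M','O','B'] v from fun v => by simpa using rep1_match 'M' ['O',' ','B'] ['M','O','B'] v]
  rw [show ∀ v, rep1 'M' [' ','O','B'] ['M','O','B'] (['M','O','B'] ++ v) = ['M','O','B'] ++ rep1 'M' [' ','O','B'] ['M','O','B'] v from fun v => rep1_skip2 'M' ' ' ['O','B'] ['M','O','B'] 'M' 'O' ['B'] (by decide) (by simp) v]
  rw [rep1_skip 'N' [' ','I','B','S','S'] ['N','I','B','S','S'] ['M','O','B'] _ (by simp)]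

set_option maxRecDepth 4000 in
theorem chain_match4 (u : List Char) :
    chainR (['M',' ','O','B'] ++ u) =
      ['M','O','B'] ++ chainR u := by
  unfold chainR
  rw [rep1_skip 'R' ['E',' ','V'] ['R','E','V'] ['M',' ','O','B'] u (by simp)]
  rw [rep1_skip 'R' [' ','E','V'] ['R','E','V'] ['M',' ','O','B'] _ (by simp)]
  rw [show ∀ v, rep1 'M' ['O',' ','B'] ['M','O','B'] (['M',' ','O','B'] ++ v) = ['M',' ','O','B'] ++ rep1 'M' ['O',' ','B'] ['M','O','B'] v from fun v => rep1_skip2 'M' 'O' [' ','B'] ['M','O','B'] 'M' ' ' ['O','B'] (by decide) (by simp) v]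
  rw [show ∀ v, rep1 'M' [' ','O','B'] ['M','O','B'] (['M',' ','O','B'] ++ v) = ['M','O','B'] ++ rep1 'M' [' ','O','B'] ['M','O','B'] v from fun v => by simpa using rep1_match 'M' [' ','O','B'] ['M','O','B'] v]
  rw [rep1_skip 'N' [' ','I','B','S','S'] ['N','I','B','S','S'] ['M','O','B'] _ (by simp)]

set_option maxRecDepth 4000 in
theorem chain_match5 (u : List Char) :
    chainR (['N',' ','I','B','S','S'] ++ u) =
      ['N','I','B','S','S'] ++ chainR u := by
  unfold chainR
  rw [rep1_skip 'R' ['E',' ','V'] ['R','E','V'] ['N',' ','I','B','S','S'] u (by simp)]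
  rw [rep1_skip 'R' [' ','E','V'] ['R','E','V'] ['N',' ','I','B','S','S'] _ (by simp)]
  rw [rep1_skip 'M' ['O',' ','B'] ['M','O','B'] ['N',' ','I','B','S','S'] _ (by simp)]
  rw [rep1_skip 'M' [' ','O','B'] ['M','O','B'] ['N',' ','I','B','S','S'] _ (by simp)]
  rw [show ∀ v, rep1 'N' [' ','I','B','S','S'] ['N','I','B','S','S'] (['N',' ','I','B','S','S'] ++ v) = ['N','I','B','S','S'] ++ rep1 'N' [' ','I','B','S','S'] ['N','I','B','S','S'] v from fun v => by simpa using rep1_match 'N' [' ','I','B','S','S'] ['N','I','B','S','S'] v]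

theorem chain_skip (c : Char) (t : List Char)
    (h1 : ¬ ['R','E',' ','V'] <+: (c :: t)) (h2 : ¬ ['R',' ','E','V'] <+: (c :: t))
    (h3 : ¬ ['M','O',' ','B'] <+: (c :: t)) (h4 : ¬ ['M',' ','O','B'] <+: (c :: t))
    (h5 : ¬ ['N',' ','I','B','S','S'] <+: (c :: t)) :
    chainR (c :: t) = c :: chainR t := by
  unfold chainR
  have n1 : ¬ ('R' :: ['E',' ','V']).isPrefixOf (c :: t) = true := by
    rw [List.isPrefixOf_iff_prefix]; exact h1
  rw [rep1_cons_neg _ _ _ _ _ n1]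
  have n2 : ¬ ('R' :: [' ','E','V']).isPrefixOf
      (c :: rep1 'R' ['E',' ','V'] ['R','E','V'] t) = true := by
    rw [List.isPrefixOf_iff_prefix, List.cons_prefix_cons]
    rintro ⟨hc, hp⟩
    rw [rep1_prefix_iff 'R' ['E',' ','V'] 'R' ['E','V'] [' ','E','V'] (by simp) t] at hp
    exact h2 (List.cons_prefix_cons.mpr ⟨hc, hp⟩)
  rw [rep1_cons_neg _ _ _ _ _ n2]
  have n3 : ¬ ('M' :: ['O',' ','B']).isPrefixOf
      (c :: rep1 'R' [' ','E','V'] ['R','E','V'] (rep1 'R' ['E',' ','V'] ['R','E','V'] t)) = true := by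
    rw [List.isPrefixOf_iff_prefix, List.cons_prefix_cons]
    rintro ⟨hc, hp⟩
    rw [rep1_prefix_iff 'R' [' ','E','V'] 'R' ['E','V'] ['O',' ','B'] (by simp) _] at hp
    rw [rep1_prefix_iff 'R' ['E',' ','V'] 'R' ['E','V'] ['O',' ','B'] (by simp) _] at hp
    exact h3 (List.cons_prefix_cons.mpr ⟨hc, hp⟩)
  rw [rep1_cons_neg _ _ _ _ _ n3]
  have n4 : ¬ ('M' :: [' ','O','B']).isPrefixOf
      (c :: rep1 'M' ['O',' ','B'] ['M','O','B'] (rep1 'R' [' ','E','V'] ['R','E','V']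
        (rep1 'R' ['E',' ','V'] ['R','E','V'] t))) = true := by
    rw [List.isPrefixOf_iff_prefix, List.cons_prefix_cons]
    rintro ⟨hc, hp⟩
    rw [rep1_prefix_iff 'M' ['O',' ','B'] 'M' ['O','B'] [' ','O','B'] (by simp) _] at hp
    rw [rep1_prefix_iff 'R' [' ','E','V'] 'R' ['E','V'] [' ','O','B'] (by simp) _] at hp
    rw [rep1_prefix_iff 'R' ['E',' ','V'] 'R' ['E','V'] [' ','O','B'] (by simp) _] at hp
    exact h4 (List.cons_prefix_cons.mpr ⟨hc, hp⟩)
  rw [rep1_cons_neg _ _ _ _ _ n4]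
  have n5 : ¬ ('N' :: [' ','I','B','S','S']).isPrefixOf
      (c :: rep1 'M' [' ','O','B'] ['M','O','B'] (rep1 'M' ['O',' ','B'] ['M','O','B']
        (rep1 'R' [' ','E','V'] ['R','E','V'] (rep1 'R' ['E',' ','V'] ['R','E','V'] t)))) = true := by
    rw [List.isPrefixOf_iff_prefix, List.cons_prefix_cons]
    rintro ⟨hc, hp⟩
    rw [rep1_prefix_iff 'M' [' ','O','B'] 'M' ['O','B'] [' ','I','B','S','S'] (by simp) _] at hp
    rw [rep1_prefix_iff 'M' ['O',' ','B'] 'M' ['O','B'] [' ','I','B','S','S'] (by simp) _] at hp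
    rw [rep1_prefix_iff 'R' [' ','E','V'] 'R' ['E','V'] [' ','I','B','S','S'] (by simp) _] at hp
    rw [rep1_prefix_iff 'R' ['E',' ','V'] 'R' ['E','V'] [' ','I','B','S','S'] (by simp) _] at hp
    exact h5 (List.cons_prefix_cons.mpr ⟨hc, hp⟩)
  rw [rep1_cons_neg _ _ _ _ _ n5]

theorem chain_eq_scan (l : List Char) : chainR l = scanGo l := by
  fun_induction scanGo l with
  | case1 => simp [chainR, rep1]
  | case2 c t h ih =>
    obtain ⟨u, hu⟩ := List.isPrefixOf_iff_prefix.mp h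
    rw [← hu] at ih ⊢
    rw [show (['R','E',' ','V'] ++ u).drop 4 = u from by simp] at ih ⊢
    rw [chain_match1, ih]
    rfl
  | case3 c t h1 h ih =>
    obtain ⟨u, hu⟩ := List.isPrefixOf_iff_prefix.mp h
    rw [← hu] at ih ⊢
    rw [show (['R',' ','E','V'] ++ u).drop 4 = u from by simp] at ih ⊢
    rw [chain_match2, ih]
    rfl
  | case4 c t h1 h2 h ih =>
    obtain ⟨u, hu⟩ := List.isPrefixOf_iff_prefix.mp h
    rw [← hu] at ih ⊢
    rw [show (['M','O',' ','B'] ++ u).drop 4 = u from by simp] at ih ⊢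
    rw [chain_match3, ih]
    rfl
  | case5 c t h1 h2 h3 h ih =>
    obtain ⟨u, hu⟩ := List.isPrefixOf_iff_prefix.mp h
    rw [← hu] at ih ⊢
    rw [show (['M',' ','O','B'] ++ u).drop 4 = u from by simp] at ih ⊢
    rw [chain_match4, ih]
    rfl
  | case6 c t h1 h2 h3 h4 h ih =>
    obtain ⟨u, hu⟩ := List.isPrefixOf_iff_prefix.mp h
    rw [← hu] at ih ⊢
    rw [show (['N',' ','I','B','S','S'] ++ u).drop 6 = u from by simp] at ih ⊢
    rw [chain_match5, ih]
    rfl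
  | case7 c t h1 h2 h3 h4 h5 ih =>
    rw [chain_skip c t (by simpa using h1) (by simpa using h2) (by simpa using h3)
      (by simpa using h4) (by simpa using h5), ih]

-- ===== VERDICT (by name: the statement is the Claim_ definition above) =====
theorem clean_format_spec : Claim_equal_clean_format := by
  intro x _
  unfold Spec_clean_format
  apply Eq.symm
  apply String.toList_inj.mp
  rw [A_toList, chain_eq_scan]
  simp [clean_format_alt, PySem.Str.toList_upper]
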